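-- pv_equiv track=rewrite | github.com/lozh/python-aoc | 2023/13/aoc_13_2.py | find_vertical_mirror
-- ===== SOURCE A (Python) =====
-- def find_vertical_mirror(layout):
--     l = len(layout[0])
--     for i in range(l - 1):
--         ml = min(i + 1, l - i - 1)
--         match = True
--         for j in range(ml):
--             c1 = [x[i - j] for x in layout]
--             c2 = [x[i + j + 1] for x in layout]
--             if c1 != c2:
--                 match = False
--                 break
--         if match:
--             yield i
-- ===== SOURCE B (Python) =====
-- def find_vertical_mirror(layout):
--     # Compress each column to a small integer id via a dict built in one pass,
--     # then scan once keeping the reversed prefix of ids: axis i is a mirror iff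
--     # the reversed prefix and the suffix agree on their common (zip-truncated) part.
--     l = len(layout[0])
--     cols = list(zip(*layout))
--     seen = {}
--     ids = []
--     for c in cols:
--         if c not in seen:
--             seen[c] = len(seen)
--         ids.append(seen[c])
--     out = []
--     rev = []
--     rest = ids
--     for i in range(l - 1):
--         rev = [rest[0]] + rev
--         rest = rest[1:]
--         if all(x == y for x, y in zip(rev, rest)):
--             out.append(i)
--     return out
-- ===== Notes on version B (the rewrite author's own statement) =====
-- stated objective: alternative
-- what changed: B replaces A's per-axis nested loop that rebuilds and compares whole character columns for every (axis, offset) pair with: a one-pass dict that compresses each distinct column to an integer id (the inner column comparison disappears), followed by a single left-to-right scan maintaining the reversed prefix of ids, where each axis is decided by one zip-truncated prefix comparison instead of mirrored index arithmetic with min().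
import Mathlib
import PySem

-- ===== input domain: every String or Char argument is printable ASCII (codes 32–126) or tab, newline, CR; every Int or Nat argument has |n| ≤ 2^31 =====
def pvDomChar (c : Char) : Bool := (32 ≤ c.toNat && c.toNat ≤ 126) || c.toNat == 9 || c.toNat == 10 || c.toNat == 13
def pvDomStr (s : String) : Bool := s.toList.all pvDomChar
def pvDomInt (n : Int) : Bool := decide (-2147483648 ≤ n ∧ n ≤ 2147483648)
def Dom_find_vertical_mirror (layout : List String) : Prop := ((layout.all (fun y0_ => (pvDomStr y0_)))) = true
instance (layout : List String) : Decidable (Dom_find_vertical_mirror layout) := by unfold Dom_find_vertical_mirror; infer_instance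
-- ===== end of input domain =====

-- B compresses each distinct column to an integer id with a dict built in one pass, then
-- decides each axis by a single zip-truncated prefix comparison on a maintained reversed
-- prefix of ids; the original A is a generator, ported (as is B) to the list of yielded values.

-- ===== PORT A =====
def find_vertical_mirror (layout : List String) : List Int :=
  let l : Int := PySem.Str.len (layout.headD "")
  (PySem.List.pyRange 0 (l - 1) 1).foldl
    (fun acc i =>
      if (PySem.List.pyRange 0 (min (i + 1) (l - i - 1)) 1).all
           (fun j =>
             (layout.map (fun x => PySem.Str.pyGet? x (i - j))) ==
             (layout.map (fun x => PySem.Str.pyGet? x (i + j + 1))))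
      then acc ++ [i] else acc) []

-- ===== PORT B =====
-- all(x == y for x, y in zip(rev, rest))
def fvm_zipAll (a b : List Int) : Bool := (a.zip b).all (fun p => p.1 == p.2)

-- one id per distinct column: 'if c not in seen: seen[c] = len(seen)' then 'ids.append(seen[c])'
def fvm_step (acc : List Int × PySem.Dict (List (Option Char)) Int) (c : List (Option Char)) :
    List Int × PySem.Dict (List (Option Char)) Int :=
  let d := if acc.2.contains c then acc.2 else acc.2.insert c (acc.2.size : Int)
  (acc.1 ++ [(d.get? c).getD 0], d)

-- 'for i in range(l-1): rev = [rest[0]] + rev; rest = rest[1:]; if zipAll: out.append(i)'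
-- (the '[] , _::_' case is Python's IndexError on rest[0]; it is unreachable inside Pre_)
def fvm_walk (rev rest idxs out : List Int) : List Int :=
  match idxs, rest with
  | [], _ => out
  | _ :: _, [] => out
  | i :: is, c :: rs =>
      fvm_walk (c :: rev) rs is (if fvm_zipAll (c :: rev) rs then out ++ [i] else out)

def find_vertical_mirror_alt (layout : List String) : List Int :=
  let l : Int := PySem.Str.len (layout.headD "")
  -- cols = list(zip(*layout)) : zip truncates to the shortest row
  let minlen : Int := layout.foldl (fun m r => min m (PySem.Str.len r)) l
  let cols : List (List (Option Char)) :=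
    (PySem.List.pyRange 0 minlen 1).map (fun k => layout.map (fun row => PySem.Str.pyGet? row k))
  let ids : List Int := (cols.foldl fvm_step ([], PySem.Dict.empty)).1
  fvm_walk [] ids (PySem.List.pyRange 0 (l - 1) 1) []

-- ===== PRECONDITION & SPEC =====
-- Pre_ excludes exactly the inputs where the Python A raises IndexError: the empty layout
-- (layout[0]) and, when the first row has length ≥ 2, any layout with a row shorter than
-- the first row (every column index 0..l-1 is read by some j = 0 step of the i-loop).
def Pre_find_vertical_mirror (layout : List String) : Prop :=
  layout ≠ [] ∧
  (2 ≤ PySem.Str.len (layout.headD "") →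
    ∀ s ∈ layout, PySem.Str.len (layout.headD "") ≤ PySem.Str.len s)
instance (layout : List String) : Decidable (Pre_find_vertical_mirror layout) := by
  unfold Pre_find_vertical_mirror; infer_instance

def pvWitness_find_vertical_mirror : List String := ["##.#", "##.."]

def Spec_find_vertical_mirror (layout : List String) (out : List Int) : Prop := out = find_vertical_mirror_alt layout
instance (layout : List String) (out : List Int) : Decidable (Spec_find_vertical_mirror layout out) := by unfold Spec_find_vertical_mirror; infer_instance

-- ===== CLAIM (what is proved, stated in full; the proofs are below) =====
def Claim_equal_find_vertical_mirror : Prop := ∀ (layout : List String), Dom_find_vertical_mirror layout → Pre_find_vertical_mirror layout → Spec_find_vertical_mirror layout (find_vertical_mirror layout)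

-- ===== LEMMAS AND PROOFS =====

theorem fvm_zipAll_iff (a b : List Int) :
    fvm_zipAll a b = true ↔ ∀ (t : Nat) (h1 : t < a.length) (h2 : t < b.length), a[t] = b[t] := by
  unfold fvm_zipAll
  rw [List.all_eq_true]
  constructor
  · intro h t h1 h2
    have hm : t < (a.zip b).length := by rw [List.length_zip]; omega
    have := h (a.zip b)[t] (List.mem_iff_getElem.mpr ⟨t, hm, rfl⟩)
    simpa [List.getElem_zip] using this
  · intro h p hp
    obtain ⟨t, ht, rfl⟩ := List.mem_iff_getElem.mp hp
    have h1 : t < a.length := by rw [List.length_zip] at ht; omega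
    have h2 : t < b.length := by rw [List.length_zip] at ht; omega
    simp [List.getElem_zip, h t h1 h2]

-- the invariant of the id-assignment fold
def FvmInv (ps : List (List (Option Char))) (ids : List Int)
    (d : PySem.Dict (List (Option Char)) Int) : Prop :=
  ids.length = ps.length ∧
  (∀ (a : Nat) c v, ps[a]? = some c → ids[a]? = some v → d.get? c = some v) ∧
  (∀ c c' v, d.get? c = some v → d.get? c' = some v → c = c') ∧
  (∀ c v, d.get? c = some v → v < (d.size : Int))

theorem fvm_step_inv (ps : List (List (Option Char))) (ids : List Int)
    (d : PySem.Dict (List (Option Char)) Int) (c : List (Option Char))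
    (h : FvmInv ps ids d) :
    FvmInv (ps ++ [c]) (fvm_step (ids, d) c).1 (fvm_step (ids, d) c).2 := by
  obtain ⟨hlen, hmem, hinj, hbnd⟩ := h
  unfold fvm_step
  by_cases hc : d.contains c = true
  · simp only [hc, if_pos]
    obtain ⟨v0, hv0⟩ : ∃ v0, d.get? c = some v0 := by
      rw [PySem.Dict.contains_eq_isSome_get?] at hc
      exact Option.isSome_iff_exists.mp hc
    refine ⟨by simp [hlen], ?_, hinj, hbnd⟩
    intro a c' v hc' hv
    by_cases ha : a < ps.length
    · rw [List.getElem?_append_left ha] at hc'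
      rw [List.getElem?_append_left (by omega)] at hv
      exact hmem a c' v hc' hv
    · have ha' : a = ps.length := by
        by_contra hne
        have : ps.length + 1 ≤ a := by omega
        rw [List.getElem?_eq_none (by simp; omega)] at hc'
        simp at hc'
      subst ha'
      rw [List.getElem?_append_right (le_refl _)] at hc'
      simp at hc'
      rw [List.getElem?_append_right (by omega)] at hv
      simp [hlen] at hv
      subst hc'
      rw [hv0] at hv ⊢
      simp at hv
      simp [hv]
  · simp only [hc, if_neg, Bool.false_eq_true, not_false_eq_true]
    have hnone : d.get? c = none := by
      rw [PySem.Dict.get?_eq_none_iff_contains]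
      simpa using hc
    have hcf : d.contains c = false := by simpa using hc
    have hsize : (d.insert c (d.size : Int)).size = d.size + 1 := by
      simp [PySem.Dict.size, PySem.Dict.items_insert, hcf]
    refine ⟨by simp [hlen], ?_, ?_, ?_⟩
    · intro a c' v hc' hv
      by_cases ha : a < ps.length
      · rw [List.getElem?_append_left ha] at hc'
        rw [List.getElem?_append_left (by omega)] at hv
        have hold := hmem a c' v hc' hv
        have hne : c' ≠ c := by
          intro he; rw [he, hnone] at hold; exact absurd hold (by simp)
        rw [PySem.Dict.get?_insert]
        simp [hne, hold]
      · have ha' : a = ps.length := by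
          by_contra hne
          have : ps.length + 1 ≤ a := by omega
          rw [List.getElem?_eq_none (by simp; omega)] at hc'
          simp at hc'
        subst ha'
        rw [List.getElem?_append_right (le_refl _)] at hc'
        simp at hc'
        rw [List.getElem?_append_right (by omega)] at hv
        simp [hlen, PySem.Dict.get?_insert_self] at hv
        subst hc'
        rw [PySem.Dict.get?_insert_self]
        simp [hv]
    · intro c1 c2 v h1 h2
      rw [PySem.Dict.get?_insert] at h1 h2
      by_cases e1 : c1 = c
      · by_cases e2 : c2 = c
        · rw [e1, e2]
        · rw [if_pos e1] at h1
          rw [if_neg e2] at h2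
          have hb := hbnd c2 v h2
          simp at h1
          omega
      · by_cases e2 : c2 = c
        · rw [if_neg e1] at h1
          rw [if_pos e2] at h2
          have hb := hbnd c1 v h1
          simp at h2
          omega
        · rw [if_neg e1] at h1
          rw [if_neg e2] at h2
          exact hinj c1 c2 v h1 h2
    · intro c' v hv
      rw [PySem.Dict.get?_insert] at hv
      rw [hsize]
      by_cases e : c' = c
      · rw [if_pos e] at hv
        simp at hv
        omega
      · rw [if_neg e] at hv
        have := hbnd c' v hv
        push_cast
        omega

theorem fvm_fold_inv (cs : List (List (Option Char))) :
    ∀ (ps : List (List (Option Char))) (ids : List Int) (d : PySem.Dict (List (Option Char)) Int),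
      FvmInv ps ids d →
      FvmInv (ps ++ cs) (cs.foldl fvm_step (ids, d)).1 (cs.foldl fvm_step (ids, d)).2 := by
  induction cs with
  | nil => intro ps ids d h; simpa using h
  | cons c cs ih =>
      intro ps ids d h
      have h' := fvm_step_inv ps ids d c h
      have := ih (ps ++ [c]) (fvm_step (ids, d) c).1 (fvm_step (ids, d) c).2 h'
      simpa [List.append_assoc] using this

theorem fvm_ids_inv (cs : List (List (Option Char))) :
    FvmInv cs (cs.foldl fvm_step ([], PySem.Dict.empty)).1 (cs.foldl fvm_step ([], PySem.Dict.empty)).2 := by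
  have h0 : FvmInv [] ([] : List Int) (PySem.Dict.empty : PySem.Dict (List (Option Char)) Int) := by
    refine ⟨rfl, ?_, ?_, ?_⟩
    · intro a c v hc _; simp at hc
    · intro c c' v h _; rw [PySem.Dict.get?_empty] at h; exact absurd h (by simp)
    · intro c v h; rw [PySem.Dict.get?_empty] at h; exact absurd h (by simp)
  simpa using fvm_fold_inv cs [] [] PySem.Dict.empty h0

-- ids equality mirrors column equality
theorem fvm_ids_eq_iff (cs : List (List (Option Char))) (a b : Nat)
    (ha : a < cs.length) (hb : b < cs.length) :
    (cs.foldl fvm_step ([], PySem.Dict.empty)).1[a]? = (cs.foldl fvm_step ([], PySem.Dict.empty)).1[b]? ↔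
    cs[a]? = cs[b]? := by
  obtain ⟨hlen, hmem, hinj, _⟩ := fvm_ids_inv cs
  set ids := (cs.foldl fvm_step ([], PySem.Dict.empty)).1 with hids
  have ha' : a < ids.length := by omega
  have hb' : b < ids.length := by omega
  rw [List.getElem?_eq_getElem ha', List.getElem?_eq_getElem hb',
      List.getElem?_eq_getElem ha, List.getElem?_eq_getElem hb]
  constructor
  · intro h
    simp only [Option.some.injEq] at h ⊢
    have g1 := hmem a cs[a] ids[a] (List.getElem?_eq_getElem ha) (List.getElem?_eq_getElem ha')
    have g2 := hmem b cs[b] ids[b] (List.getElem?_eq_getElem hb) (List.getElem?_eq_getElem hb')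
    rw [h] at g1
    exact hinj _ _ _ g1 g2
  · intro h
    simp only [Option.some.injEq] at h ⊢
    have g1 := hmem a cs[a] ids[a] (List.getElem?_eq_getElem ha) (List.getElem?_eq_getElem ha')
    have g2 := hmem b cs[b] ids[b] (List.getElem?_eq_getElem hb) (List.getElem?_eq_getElem hb')
    rw [h] at g1
    rw [g1] at g2
    exact (Option.some.injEq _ _).mp g2

-- the walk is a filter over the index range
theorem fvm_walk_eq (ids : List Int) (e : Int) (he : e ≤ (ids.length : Int)) :
    ∀ (k : Nat) (n : Int) (out : List Int), 0 ≤ n → (e - n).toNat = k →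
      fvm_walk ((ids.take n.toNat).reverse) (ids.drop n.toNat) (PySem.List.pyRange n e 1) out
        = out ++ (PySem.List.pyRange n e 1).filter
            (fun i => fvm_zipAll ((ids.take (i + 1).toNat).reverse) (ids.drop (i + 1).toNat)) := by
  intro k
  induction k with
  | zero =>
      intro n out hn hk
      rw [PySem.List.pyRange_one_eq_nil (by omega)]
      simp [fvm_walk]
  | succ k ih =>
      intro n out hn hk
      have hne : n < e := by omega
      rw [PySem.List.pyRange_one_cons hne]
      have hnl : n.toNat < ids.length := by omega
      have hdrop : ids.drop n.toNat = ids[n.toNat] :: ids.drop (n.toNat + 1) :=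
        List.drop_eq_getElem_cons hnl
      have htake : (ids.take (n.toNat + 1)).reverse = ids[n.toNat] :: (ids.take n.toNat).reverse := by
        rw [List.take_add_one, List.getElem?_eq_getElem hnl]
        simp
      rw [hdrop]
      show fvm_walk _ _ _ _ = _
      rw [fvm_walk]
      have hn1 : (n + 1).toNat = n.toNat + 1 := by omega
      have step := ih (n + 1) (if fvm_zipAll (ids[n.toNat] :: (ids.take n.toNat).reverse) (ids.drop (n.toNat + 1)) then out ++ [n] else out) (by omega) (by omega)
      rw [hn1, htake] at step
      rw [step, List.filter_cons]
      have hpred : (fvm_zipAll ((ids.take (n + 1).toNat).reverse) (ids.drop (n + 1).toNat))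
          = fvm_zipAll (ids[n.toNat] :: (ids.take n.toNat).reverse) (ids.drop (n.toNat + 1)) := by
        rw [hn1, htake]
      by_cases hz : fvm_zipAll (ids[n.toNat] :: (ids.take n.toNat).reverse) (ids.drop (n.toNat + 1)) = true
      · simp only [hz, if_pos, hpred]
        simp
      · simp only [hpred]
        simp only [Bool.not_eq_true] at hz
        simp [hz]

theorem fvm_minlen_eq (layout : List String) (a : Int)
    (h : ∀ r ∈ layout, a ≤ PySem.Str.len r) :
    layout.foldl (fun m r => min m (PySem.Str.len r)) a = a := by
  induction layout with
  | nil => rfl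
  | cons r rs ih =>
      have h1 : a ≤ PySem.Str.len r := h r (by simp)
      have : min a (PySem.Str.len r) = a := by omega
      simp only [List.foldl_cons, this]
      exact ih (fun s hs => h s (by simp [hs]))

theorem fv_eq_alt (layout : List String) (hpre : Pre_find_vertical_mirror layout) :
    find_vertical_mirror layout = find_vertical_mirror_alt layout := by
  obtain ⟨hne, hrows⟩ := hpre
  simp only [find_vertical_mirror, find_vertical_mirror_alt]
  set l : Int := PySem.Str.len (layout.headD "") with hldef
  by_cases hl : l < 2
  · rw [PySem.List.pyRange_one_eq_nil (by omega)]
    simp [fvm_walk]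
  · have hl2 : 2 ≤ l := by omega
    rw [fvm_minlen_eq layout l (hrows hl2)]
    set cols : List (List (Option Char)) :=
      (PySem.List.pyRange 0 l 1).map (fun k => layout.map (fun row => PySem.Str.pyGet? row k)) with hcolsdef
    set ids : List Int := (cols.foldl fvm_step ([], PySem.Dict.empty)).1 with hidsdef
    have hclen : cols.length = l.toNat := by
      rw [hcolsdef, List.length_map, PySem.List.length_pyRange_one]
      omega
    have hilen : ids.length = l.toNat := by
      have h := (fvm_ids_inv cols).1
      rw [← hidsdef, hclen] at h
      exact h
    have hcget : ∀ (k : Nat), k < l.toNat →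
        cols[k]? = some (layout.map (fun row => PySem.Str.pyGet? row (k : Int))) := by
      intro k hk
      rw [hcolsdef]
      rw [List.getElem?_eq_getElem (by rw [List.length_map, PySem.List.length_pyRange_one]; omega)]
      simp only [List.getElem_map, PySem.List.getElem_pyRange_one]
      norm_num
    have hids_iff : ∀ (a b : Nat) (ha : a < l.toNat) (hb : b < l.toNat),
        (ids[a]'(by omega) = ids[b]'(by omega) ↔
         layout.map (fun row => PySem.Str.pyGet? row (a : Int)) =
         layout.map (fun row => PySem.Str.pyGet? row (b : Int))) := by
      intro a b ha hb
      have h0 := fvm_ids_eq_iff cols a b (by omega) (by omega)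
      rw [← hidsdef] at h0
      rw [List.getElem?_eq_getElem (by omega), List.getElem?_eq_getElem (by omega),
          hcget a ha, hcget b hb] at h0
      simpa using h0
    have hwalk := fvm_walk_eq ids (l - 1) (by omega) ((l - 1 - 0).toNat) 0 [] (le_refl 0) rfl
    simp only [Int.toNat_zero, List.take_zero, List.reverse_nil, List.drop_zero] at hwalk
    rw [hwalk, PySem.List.foldl_append_if_eq_filter]
    simp only [List.nil_append]
    apply List.filter_congr
    intro i hi
    rw [PySem.List.mem_pyRange_one] at hi
    obtain ⟨hi0, hi1⟩ := hi
    set m : Int := min (i + 1) (l - i - 1) with hmdef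
    have hm1 : 1 ≤ m := by omega
    have hn1 : (i + 1).toNat = i.toNat + 1 := by omega
    rw [Bool.eq_iff_iff, List.all_eq_true, fvm_zipAll_iff]
    have hrevlen : ((ids.take (i + 1).toNat).reverse).length = (i + 1).toNat := by
      rw [List.length_reverse, List.length_take]
      omega
    have hrestlen : (ids.drop (i + 1).toNat).length = l.toNat - (i + 1).toNat := by
      rw [List.length_drop]
      omega
    have hrev_get : ∀ (t : Nat) (h : t < ((ids.take (i + 1).toNat).reverse).length),
        ((ids.take (i + 1).toNat).reverse)[t]
          = ids[(i - (t : Int)).toNat]'(by rw [hrevlen] at h; omega) := by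
      intro t h
      rw [List.getElem_reverse, List.getElem_take]
      apply getElem_congr_idx
      rw [hrevlen] at h
      rw [List.length_take]
      omega
    have hrest_get : ∀ (t : Nat) (h : t < (ids.drop (i + 1).toNat).length),
        (ids.drop (i + 1).toNat)[t]
          = ids[(i + (t : Int) + 1).toNat]'(by rw [hrestlen] at h; omega) := by
      intro t h
      rw [List.getElem_drop]
      apply getElem_congr_idx
      omega
    constructor
    · intro h t h1 h2
      rw [hrev_get t h1, hrest_get t h2]
      rw [hrevlen] at h1
      rw [hrestlen] at h2
      have hj := h (t : Int) (by rw [PySem.List.mem_pyRange_one]; omega)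
      rw [beq_iff_eq] at hj
      have e1 : i - (t : Int) = (((i - (t : Int)).toNat : Nat) : Int) := by omega
      have e2 : i + (t : Int) + 1 = (((i + (t : Int) + 1).toNat : Nat) : Int) := by omega
      rw [e1, e2] at hj
      exact (hids_iff _ _ (by omega) (by omega)).mpr hj
    · intro h j hj
      rw [PySem.List.mem_pyRange_one] at hj
      obtain ⟨hj0, hjm⟩ := hj
      rw [beq_iff_eq]
      have h1 : j.toNat < ((ids.take (i + 1).toNat).reverse).length := by rw [hrevlen]; omega
      have h2 : j.toNat < (ids.drop (i + 1).toNat).length := by rw [hrestlen]; omega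
      have hx := h j.toNat h1 h2
      rw [hrev_get _ h1, hrest_get _ h2] at hx
      rw [hids_iff _ _ (by rw [hrevlen] at h1; omega) (by rw [hrestlen] at h2; omega)] at hx
      have e1 : (((i - (j.toNat : Int)).toNat : Nat) : Int) = i - j := by omega
      have e2 : (((i + (j.toNat : Int) + 1).toNat : Nat) : Int) = i + j + 1 := by omega
      rw [e1, e2] at hx
      exact hx

-- ===== VERDICT (by name: the statement is the Claim_ definition above) =====
theorem find_vertical_mirror_spec : Claim_equal_find_vertical_mirror := by
  intro layout _ hpre
  exact fv_eq_alt layout hpre
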